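-- pv_equiv track=rewrite | github.com/pavpanchekha/fpsim | fpan.py | critical_gates
-- ===== SOURCE A (Python) =====
-- def critical_gates(fpan):
--     """Return the list of gate indices on the critical path of ``fpan``.
--
--     Each entry of ``fpan`` is a tuple ``(a, b, op)``.  The gate takes two
--     inputs and writes two outputs back to registers ``a`` and ``b``.  The
--     latency to each output depends on ``op``:
--
--     ``ts``  -> ``(3, 15)``
--     ``fts`` -> ``(3, 9)``
--     ``add`` -> ``(3, 3)``
--     ``cts`` -> ``(3, 11)``
--
--     The critical path is the dependency chain with the largest total latency.
--     Gate indices are returned 0-based.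
--     """
--
--     if not fpan:
--         return []
--
--     n_regs = max(max(a, b) for a, b, _ in fpan)
--
--     reg_time = [0] * (n_regs + 1)
--     reg_src = [None] * (n_regs + 1)
--
--     gate_info = []
--
--     latencies = {
--         "ts": (3, 15),
--         "fts": (3, 9),
--         "add": (3, 3),
--         "cts": (3, 11),
--     }
--
--     for i, (ra, rb, op) in enumerate(fpan):
--         ia_time = reg_time[ra]
--         ib_time = reg_time[rb]
--         ia_src = reg_src[ra]
--         ib_src = reg_src[rb]
--         start = max(ia_time, ib_time)
--         gate_info.append((ia_src, ia_time, ib_src, ib_time, start))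
--
--         a_lat, b_lat = latencies[op]
--         reg_time[ra] = start + a_lat
--         reg_src[ra] = i
--         reg_time[rb] = start + b_lat
--         reg_src[rb] = i
--
--     max_time = max(reg_time[1:])
--     worklist = [reg_src[r] for r in range(1, n_regs + 1)
--                 if reg_time[r] == max_time and reg_src[r] is not None]
--
--     crit = set()
--     while worklist:
--         idx = worklist.pop()
--         if idx is None or idx in crit:
--             continue
--         crit.add(idx)
--         ia_src, ia_time, ib_src, ib_time, start = gate_info[idx]
--         if ia_time == start and ia_src is not None:
--             worklist.append(ia_src)
--         if ib_time == start and ib_src is not None: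
--             worklist.append(ib_src)
--
--     return set(crit)
-- ===== SOURCE B (Python) =====
-- def critical_gates(fpan):
--     """Return the set of gate indices on the critical path of ``fpan``.
--
--     Different decomposition: the forward pass keeps one list of
--     ``(time, src)`` pairs per register (instead of two parallel arrays), and
--     the backward phase is a single descending sweep over a boolean flag array
--     (instead of a worklist): every input source of a gate has a strictly
--     smaller index, so one pass from high to low indices closes the critical
--     set.  The result is a set, so the collection order is immaterial.
--     """
--     if not fpan:
--         return []
--
--     n_regs = max(max(a, b) for a, b, _ in fpan)
--     LAT = {"ts": (3, 15), "fts": (3, 9), "add": (3, 3), "cts": (3, 11)}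
--
--     regs = [(0, None)] * (n_regs + 1)
--     gate_info = []
--     i = 0
--     for ra, rb, op in fpan:
--         ta, sa = regs[ra]
--         tb, sb = regs[rb]
--         start = tb if ta < tb else ta
--         gate_info.append((sa, ta, sb, tb, start))
--         la, lb = LAT[op]
--         regs[ra] = (start + la, i)
--         regs[rb] = (start + lb, i)
--         i += 1
--
--     tail = regs[1:]
--     max_time = max(t for t, _ in tail)
--
--     n = len(fpan)
--     flag = [False] * n
--     for t, s in tail:
--         if t == max_time and s is not None:
--             flag[s] = True
--
--     for idx in range(n - 1, -1, -1):
--         if flag[idx]: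
--             sa, ta, sb, tb, start = gate_info[idx]
--             if ta == start and sa is not None:
--                 flag[sa] = True
--             if tb == start and sb is not None:
--                 flag[sb] = True
--
--     return {idx for idx in range(n) if flag[idx]}
-- ===== Notes on version B (the rewrite author's own statement) =====
-- stated objective: alternative
-- what changed: The forward pass keeps one list of (time, src) pairs per register instead of two parallel arrays, and the backward worklist-with-membership-set is replaced by a single descending sweep over a boolean flag array (correct because every gate's input source has a strictly smaller index), collecting the result in index order.
import Mathlib
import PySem

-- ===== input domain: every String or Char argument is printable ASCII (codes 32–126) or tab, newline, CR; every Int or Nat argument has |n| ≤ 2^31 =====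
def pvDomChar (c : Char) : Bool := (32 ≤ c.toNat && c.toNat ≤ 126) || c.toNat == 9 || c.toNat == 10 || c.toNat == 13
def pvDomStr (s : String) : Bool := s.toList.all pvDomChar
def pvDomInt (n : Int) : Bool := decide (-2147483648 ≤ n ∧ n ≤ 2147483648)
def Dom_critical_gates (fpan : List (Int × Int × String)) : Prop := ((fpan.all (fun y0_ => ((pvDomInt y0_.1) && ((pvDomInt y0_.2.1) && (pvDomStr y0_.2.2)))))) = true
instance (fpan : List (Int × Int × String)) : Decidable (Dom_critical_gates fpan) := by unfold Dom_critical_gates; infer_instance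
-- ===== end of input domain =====

-- B replaces A's two parallel register arrays by one list of (time, src) pairs and A's
-- backward worklist by a single descending sweep over a boolean flag array (every input
-- source of a gate has a strictly smaller index, so one pass closes the critical set).
-- Both Pythons return a SET of gate indices: a set value is order-free, so both ports
-- represent the returned set by its increasing-order element list.
-- A gate_info record: (ia_src, ia_time, ib_src, ib_time, start)
abbrev pvGInfo : Type := Option Int × Int × Option Int × Int × Int

-- ===== PORT A =====
-- latencies[op]  (the (0,0) default is dead under Pre_: op is one of the four keys there)
def pvLat (op : String) : Int × Int :=
  (((((PySem.Dict.empty).insert "ts" ((3 : Int), (15 : Int))).insert "fts" (3, 9)).insert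
        "add" (3, 3)).insert "cts" (3, 11)).getD op (0, 0)

-- one iteration of `for i, (ra, rb, op) in enumerate(fpan)` over the state (reg_time, reg_src, gate_info)
def pvStep (st : List Int × List (Option Int) × List pvGInfo) (p : Int × Int × Int × String) :
    List Int × List (Option Int) × List pvGInfo :=
  let i := p.1; let ra := p.2.1; let rb := p.2.2.1; let op := p.2.2.2
  let ia_time := PySem.List.pyGetD st.1 ra 0
  let ib_time := PySem.List.pyGetD st.1 rb 0
  let ia_src := PySem.List.pyGetD st.2.1 ra none
  let ib_src := PySem.List.pyGetD st.2.1 rb none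
  let start := max ia_time ib_time
  let gi := st.2.2 ++ [(ia_src, ia_time, ib_src, ib_time, start)]
  let lat := pvLat op
  let rt1 := PySem.List.pySetD st.1 ra (start + lat.1)
  let rs1 := PySem.List.pySetD st.2.1 ra (some i)
  let rt2 := PySem.List.pySetD rt1 rb (start + lat.2)
  let rs2 := PySem.List.pySetD rs1 rb (some i)
  (rt2, rs2, gi)

-- n_regs = max(max(a, b) for a, b, _ in fpan)   (the .getD 0 is dead: guarded by `if not fpan`)
def pvNRegs (fpan : List (Int × Int × String)) : Int :=
  (PySem.List.max? (fpan.map (fun t => max t.1 t.2.1)) (fun x => x)).getD 0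

-- reg_time = [0]*(n_regs+1); reg_src = [None]*(n_regs+1); gate_info = []; then the forward loop
def pvForward (fpan : List (Int × Int × String)) (nregs : Int) :
    List Int × List (Option Int) × List pvGInfo :=
  (PySem.List.enumerate fpan 0).foldl pvStep
    (PySem.List.pyRepeat [(0 : Int)] (nregs + 1), PySem.List.pyRepeat [(none : Option Int)] (nregs + 1), [])

-- max_time = max(reg_time[1:])   (the .getD 0 is dead under Pre_: 1 ≤ n_regs there)
def pvMaxTime (rt : List Int) : Int :=
  (PySem.List.max? (PySem.List.slice rt (some 1) none) (fun x => x)).getD 0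

-- [reg_src[r] for r in range(1, n_regs+1) if reg_time[r] == max_time and reg_src[r] is not None]
def pvSeeds (rt : List Int) (rs : List (Option Int)) (nregs mt : Int) : List Int :=
  (PySem.List.pyRange 1 (nregs + 1) 1).foldl
    (fun acc r =>
      if PySem.List.pyGetD rt r 0 = mt ∧ PySem.List.pyGetD rs r none ≠ none then
        acc ++ [(PySem.List.pyGetD rs r none).getD 0]
      else acc) []

-- A's backward `while worklist:` loop. The Nat fuel is a totality guard only (the loop is
-- proven below to finish within it); worklist entries are always ints, so the Python's
-- vacuous `if idx is None` guard has no counterpart.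
def pvLoopA (gi : List pvGInfo) : Nat → PySem.Set Int → List Int → PySem.Set Int
  | 0, crit, _ => crit
  | Nat.succ f, crit, wl =>
    match PySem.List.pop? wl with
    | none => crit
    | some (idx, rest) =>
      if PySem.Set.contains crit idx then pvLoopA gi f crit rest
      else
        let crit' := PySem.Set.add crit idx
        let g := PySem.List.pyGetD gi idx ((none : Option Int), (0 : Int), (none : Option Int), (0 : Int), (0 : Int))
        let rest1 := if g.2.1 = g.2.2.2.2 ∧ g.1 ≠ none then rest ++ [g.1.getD 0] else rest
        let rest2 := if g.2.2.2.1 = g.2.2.2.2 ∧ g.2.2.1 ≠ none then rest1 ++ [g.2.2.1.getD 0] else rest1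
        pvLoopA gi f crit' rest2

-- `return set(crit)` — a set value is order-free; represented by its increasing element list
def critical_gates (fpan : List (Int × Int × String)) : List Int :=
  if fpan = [] then []
  else
    let n_regs := pvNRegs fpan
    let st := pvForward fpan n_regs
    let max_time := pvMaxTime st.1
    let worklist := pvSeeds st.1 st.2.1 n_regs max_time
    PySem.List.sorted
      (PySem.Set.ofList
        (pvLoopA st.2.2 (3 * st.2.2.length + worklist.length + 1) PySem.Set.empty worklist))
      (fun x => x) false

-- ===== PORT B =====
-- LAT[op]  (the (0,0) default is dead under Pre_)
def pbLat (op : String) : Int × Int :=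
  (((((PySem.Dict.empty).insert "ts" ((3 : Int), (15 : Int))).insert "fts" (3, 9)).insert
        "add" (3, 3)).insert "cts" (3, 11)).getD op (0, 0)

-- B's forward loop: structural recursion over fpan with an explicit counter i,
-- carrying the single `regs` list of (time, src) pairs and `gate_info`
def pbLoop : List (Int × Int × String) → Int → List (Int × Option Int) → List pvGInfo →
    List (Int × Option Int) × List pvGInfo
  | [], _, regs, gi => (regs, gi)
  | (ra, rb, op) :: rest, i, regs, gi =>
    let pa := PySem.List.pyGetD regs ra ((0 : Int), (none : Option Int))
    let pb := PySem.List.pyGetD regs rb ((0 : Int), (none : Option Int))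
    let start := if pa.1 < pb.1 then pb.1 else pa.1
    let lat := pbLat op
    pbLoop rest (i + 1)
      (PySem.List.pySetD (PySem.List.pySetD regs ra (start + lat.1, some i)) rb (start + lat.2, some i))
      (gi ++ [(pa.2, pa.1, pb.2, pb.1, start)])

-- `for t, s in tail: if t == max_time and s is not None: flag[s] = True`
def pbSeedStep (mt : Int) (fl : List Bool) (p : Int × Option Int) : List Bool :=
  if p.1 = mt ∧ p.2 ≠ none then PySem.List.pySetD fl (p.2.getD 0) true else fl

-- body of `for idx in range(n-1, -1, -1): if flag[idx]: …`
def pbSweepStep (gi : List pvGInfo) (fl : List Bool) (idx : Int) : List Bool :=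
  if PySem.List.pyGetD fl idx false then
    let g := PySem.List.pyGetD gi idx ((none : Option Int), (0 : Int), (none : Option Int), (0 : Int), (0 : Int))
    let fl1 := if g.2.1 = g.2.2.2.2 ∧ g.1 ≠ none then PySem.List.pySetD fl (g.1.getD 0) true else fl
    if g.2.2.2.1 = g.2.2.2.2 ∧ g.2.2.1 ≠ none then PySem.List.pySetD fl1 (g.2.2.1.getD 0) true else fl1
  else fl

-- `{idx for idx in range(n) if flag[idx]}` — built in increasing idx order
def critical_gates_alt (fpan : List (Int × Int × String)) : List Int :=
  if fpan = [] then []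
  else
    let n_regs := (PySem.List.max? (fpan.map (fun t => max t.1 t.2.1)) (fun x => x)).getD 0
    let fw := pbLoop fpan 0 (PySem.List.pyRepeat [((0 : Int), (none : Option Int))] (n_regs + 1)) []
    let tail := PySem.List.slice fw.1 (some 1) none
    let max_time := (PySem.List.max? (tail.map (fun p => p.1)) (fun x => x)).getD 0
    let n : Int := (fpan.length : Int)
    let flag0 := tail.foldl (pbSeedStep max_time) (PySem.List.pyRepeat [false] n)
    let flag := (PySem.List.pyRange (n - 1) (-1) (-1)).foldl (pbSweepStep fw.2) flag0
    PySem.Set.ofList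
      ((PySem.List.pyRange 0 n 1).filter (fun idx => PySem.List.pyGetD flag idx false))

-- ===== PRECONDITION & SPEC =====
-- Pre_ admits exactly the inputs on which the Python A returns: empty input, or every op one
-- of the four latency keys (else KeyError), every register index ≥ -(n_regs+1) (else
-- IndexError; positive indices are ≤ n_regs by definition of the maximum) and n_regs ≥ 1
-- (else `max(reg_time[1:])` is a max of an empty sequence, ValueError).
def Pre_critical_gates (fpan : List (Int × Int × String)) : Prop :=
  fpan = [] ∨
    (let M := (fpan.map (fun t => max t.1 t.2.1)).foldl max 0
     1 ≤ M ∧ ∀ t ∈ fpan,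
        (t.2.2 = "ts" ∨ t.2.2 = "fts" ∨ t.2.2 = "add" ∨ t.2.2 = "cts") ∧
        -(M + 1) ≤ t.1 ∧ -(M + 1) ≤ t.2.1)
instance (fpan : List (Int × Int × String)) : Decidable (Pre_critical_gates fpan) := by
  unfold Pre_critical_gates; infer_instance

def pvWitness_critical_gates : (List (Int × Int × String)) := [(1, 2, "ts"), (2, 1, "add")]

def Spec_critical_gates (fpan : List (Int × Int × String)) (out : List Int) : Prop := out = critical_gates_alt fpan
instance (fpan : List (Int × Int × String)) (out : List Int) : Decidable (Spec_critical_gates fpan out) := by unfold Spec_critical_gates; infer_instance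

-- ===== CLAIM (what is proved, stated in full; the proofs are below) =====
def Claim_equal_critical_gates : Prop := ∀ (fpan : List (Int × Int × String)), Dom_critical_gates fpan → Pre_critical_gates fpan → Spec_critical_gates fpan (critical_gates fpan)

-- ===== LEMMAS AND PROOFS =====

-- elements of a Python list-assignment are the new value or old elements
theorem pv_mem_pySetD {α : Type} (xs : List α) (i : Int) (v : α) (o : α)
    (h : o ∈ PySem.List.pySetD xs i v) : o = v ∨ o ∈ xs := by
  unfold PySem.List.pySetD PySem.List.pySet? at h
  rcases hk : PySem.List.pyIdx? xs.length i with _ | k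
  · rw [hk] at h; simp at h; right; exact h
  · rw [hk] at h; simp at h
    rcases List.mem_or_eq_of_mem_set h with h' | h'
    · right; exact h'
    · left; exact h'

-- a non-default pyGetD result (default none) is an element of the list
theorem pv_getD_src (rs : List (Option Int)) (r : Int) (t : Int)
    (h : PySem.List.pyGetD rs r none = some t) : (some t : Option Int) ∈ rs := by
  have hb : PySem.List.pyGetD rs r none = (PySem.List.pyGet? rs r).getD none := by
    simp [PySem.List.pyGetD]
  rcases hg : PySem.List.pyGet? rs r with _ | o
  · rw [hg] at hb; simp at hb; rw [h] at hb; exact absurd hb (by simp)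
  · rw [hg] at hb; simp at hb
    have := PySem.List.mem_of_pyGet?_eq_some rs hg
    rw [← hb, h] at this; exact this

-- invariants of the forward pass
def pvValid (gi : List pvGInfo) (x : Int) : Prop := 0 ≤ x ∧ x < (gi.length : Int)

def pvGOK (k : Nat) (g : pvGInfo) : Prop :=
  (∀ s, g.1 = some s → 0 ≤ s ∧ s < (k : Int)) ∧ (∀ s, g.2.2.1 = some s → 0 ≤ s ∧ s < (k : Int))

-- every source stored in gate_info points strictly below its own gate index
def pvWF (gi : List pvGInfo) : Prop := ∀ k, (h : k < gi.length) → pvGOK k gi[k]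

-- every source stored in reg_src is a gate index already processed
def pvRSOK (i : Int) (rs : List (Option Int)) : Prop :=
  ∀ o ∈ rs, ∀ s, o = some s → 0 ≤ s ∧ s < i

theorem pv_fwd_inv (l : List (Int × Int × String)) :
    ∀ (s : Int) (rt : List Int) (rs : List (Option Int)) (gi : List pvGInfo),
      0 ≤ s → (gi.length : Int) = s → pvRSOK s rs → pvWF gi →
      pvWF ((PySem.List.enumerate l s).foldl pvStep (rt, rs, gi)).2.2 ∧
      pvRSOK (s + l.length) ((PySem.List.enumerate l s).foldl pvStep (rt, rs, gi)).2.1 ∧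
      ((((PySem.List.enumerate l s).foldl pvStep (rt, rs, gi)).2.2.length : Int) = s + l.length) := by
  induction l with
  | nil =>
    intro s rt rs gi h0 hlen hrs hwf
    rw [PySem.List.enumerate_nil]
    exact ⟨hwf, by simpa using hrs, by simpa using hlen⟩
  | cons x xs ih =>
    intro s rt rs gi h0 hlen hrs hwf
    rcases x with ⟨ra, rb, op⟩
    rw [PySem.List.enumerate_cons, List.foldl_cons]
    have key : pvStep (rt, rs, gi) (s, (ra, rb, op)) =
        (PySem.List.pySetD (PySem.List.pySetD rt ra
            (max (PySem.List.pyGetD rt ra 0) (PySem.List.pyGetD rt rb 0) + (pvLat op).1)) rb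
            (max (PySem.List.pyGetD rt ra 0) (PySem.List.pyGetD rt rb 0) + (pvLat op).2),
         PySem.List.pySetD (PySem.List.pySetD rs ra (some s)) rb (some s),
         gi ++ [(PySem.List.pyGetD rs ra none, PySem.List.pyGetD rt ra 0,
                 PySem.List.pyGetD rs rb none, PySem.List.pyGetD rt rb 0,
                 max (PySem.List.pyGetD rt ra 0) (PySem.List.pyGetD rt rb 0))]) := rfl
    rw [key]
    have hrs' : pvRSOK (s + 1) (PySem.List.pySetD (PySem.List.pySetD rs ra (some s)) rb (some s)) := by
      intro o ho t hot
      rcases pv_mem_pySetD _ _ _ _ ho with h' | h'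
      · rw [h'] at hot; injection hot with h''; omega
      · rcases pv_mem_pySetD _ _ _ _ h' with h'' | h''
        · rw [h''] at hot; injection hot with h3; omega
        · have := hrs o h'' t hot; omega
    have hwf' : pvWF (gi ++ [(PySem.List.pyGetD rs ra none, PySem.List.pyGetD rt ra 0,
                 PySem.List.pyGetD rs rb none, PySem.List.pyGetD rt rb 0,
                 max (PySem.List.pyGetD rt ra 0) (PySem.List.pyGetD rt rb 0))]) := by
      intro k hk
      rw [List.length_append, List.length_singleton] at hk
      by_cases hlt : k < gi.length
      · rw [List.getElem_append_left hlt]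
        exact hwf k hlt
      · have hkeq : k = gi.length := by omega
        subst hkeq
        simp only [List.getElem_concat_length]
        constructor
        · intro t ht
          have := hrs _ (pv_getD_src rs ra t ht) t rfl
          omega
        · intro t ht
          have := hrs _ (pv_getD_src rs rb t ht) t rfl
          omega
    have hlen' : ((gi ++ [(PySem.List.pyGetD rs ra none, PySem.List.pyGetD rt ra 0,
                 PySem.List.pyGetD rs rb none, PySem.List.pyGetD rt rb 0,
                 max (PySem.List.pyGetD rt ra 0) (PySem.List.pyGetD rt rb 0))]).length : Int) = s + 1 := by
      rw [List.length_append, List.length_singleton]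
      push_cast
      omega
    have hmain := ih (s + 1)
      (PySem.List.pySetD (PySem.List.pySetD rt ra
            (max (PySem.List.pyGetD rt ra 0) (PySem.List.pyGetD rt rb 0) + (pvLat op).1)) rb
            (max (PySem.List.pyGetD rt ra 0) (PySem.List.pyGetD rt rb 0) + (pvLat op).2))
      (PySem.List.pySetD (PySem.List.pySetD rs ra (some s)) rb (some s))
      (gi ++ [(PySem.List.pyGetD rs ra none, PySem.List.pyGetD rt ra 0,
                 PySem.List.pyGetD rs rb none, PySem.List.pyGetD rt rb 0,
                 max (PySem.List.pyGetD rt ra 0) (PySem.List.pyGetD rt rb 0))])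
      (by omega) hlen' hrs' hwf'
    refine ⟨hmain.1, ?_, ?_⟩
    · have := hmain.2.1
      simpa [add_assoc, add_comm, add_left_comm] using this
    · have := hmain.2.2
      push_cast [List.length_cons] at this ⊢
      omega

-- every seed is a reg_src entry
theorem pv_seeds_mem (rt : List Int) (rs : List (Option Int)) (n mt : Int) :
    ∀ x ∈ pvSeeds rt rs n mt, some x ∈ rs := by
  intro x hx
  unfold pvSeeds at hx
  rw [PySem.List.foldl_append_ite
      (p := fun r => PySem.List.pyGetD rt r 0 = mt ∧ PySem.List.pyGetD rs r none ≠ none)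
      (f := fun r => (PySem.List.pyGetD rs r none).getD 0)] at hx
  simp only [List.nil_append, List.mem_map, List.mem_filter, decide_eq_true_eq] at hx
  obtain ⟨r, ⟨_, _, hne⟩, hfx⟩ := hx
  have hb : PySem.List.pyGetD rs r none = (PySem.List.pyGet? rs r).getD none := by
    simp [PySem.List.pyGetD]
  rcases hg : PySem.List.pyGet? rs r with _ | o
  · rw [hg] at hb; simp at hb; exact absurd hb hne
  · rw [hg] at hb; simp at hb
    rcases o with _ | x'
    · exact absurd hb hne
    · have hx' : x' = x := by rw [hb] at hfx; simpa using hfx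
      have hm : (some x' : Option Int) ∈ rs := PySem.List.mem_of_pyGet?_eq_some rs hg
      exact hx' ▸ hm

-- the number of gate indices not yet in crit
def pvMiss (gi : List pvGInfo) (crit : List Int) : Nat :=
  ((List.range gi.length).filter (fun (j : Nat) => decide ((j : Int) ∉ crit))).length

theorem pv_miss_add (gi : List pvGInfo) (crit : List Int) (x : Int)
    (hx : x ∉ crit) (h0 : 0 ≤ x) (h1 : x < (gi.length : Int)) :
    pvMiss gi (crit ++ [x]) + 1 = pvMiss gi crit := by
  unfold pvMiss
  have hxt : x.toNat < gi.length := by omega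
  have h2 : (List.range gi.length).filter (fun (j : Nat) => decide ((j : Int) ∉ crit ++ [x]))
      = ((List.range gi.length).filter (fun (j : Nat) => decide ((j : Int) ∉ crit))).filter (fun j => decide (j ≠ x.toNat)) := by
    rw [List.filter_filter]
    apply List.filter_congr
    intro j _
    by_cases hj : (j : Int) ∈ crit <;> by_cases hjx : j = x.toNat <;> (simp_all; try omega)
  rw [h2]
  have hnd : ((List.range gi.length).filter (fun (j : Nat) => decide ((j : Int) ∉ crit))).Nodup :=
    List.Nodup.filter _ (List.nodup_range)
  have hmem : x.toNat ∈ (List.range gi.length).filter (fun (j : Nat) => decide ((j : Int) ∉ crit)) := by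
    simp only [List.mem_filter, List.mem_range, decide_eq_true_eq]
    exact ⟨hxt, by simpa [Int.toNat_of_nonneg h0] using hx⟩
  have herase : ((List.range gi.length).filter (fun (j : Nat) => decide ((j : Int) ∉ crit))).filter (fun j => decide (j ≠ x.toNat))
      = ((List.range gi.length).filter (fun (j : Nat) => decide ((j : Int) ∉ crit))).erase x.toNat := by
    rw [List.Nodup.erase_eq_filter hnd]
    apply List.filter_congr; intro j _; rw [Bool.eq_iff_iff]; simp
  rw [herase, List.length_erase_of_mem hmem]
  have : 0 < ((List.range gi.length).filter (fun (j : Nat) => decide ((j : Int) ∉ crit))).length :=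
    List.length_pos_of_mem hmem
  omega

-- the critical-edge relation of gate_info: s is an input source of x read at its start time
def pvDefG : pvGInfo := ((none : Option Int), (0 : Int), (none : Option Int), (0 : Int), (0 : Int))

def pvEdge (gi : List pvGInfo) (x s : Int) : Prop :=
  let g := PySem.List.pyGetD gi x pvDefG
  (g.2.1 = g.2.2.2.2 ∧ g.1 = some s) ∨ (g.2.2.2.1 = g.2.2.2.2 ∧ g.2.2.1 = some s)

-- the gates on the critical path: reachable from a seed along critical edges
inductive pvReach (gi : List pvGInfo) (seeds : List Int) : Int → Prop
  | seed {x : Int} : x ∈ seeds → pvReach gi seeds x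
  | step {x s : Int} : pvReach gi seeds x → pvEdge gi x s → pvReach gi seeds s

theorem pvReach_minimal (gi : List pvGInfo) (seeds : List Int) (P : Int → Prop)
    (hseed : ∀ x ∈ seeds, P x) (hstep : ∀ x s, P x → pvEdge gi x s → P s) :
    ∀ x, pvReach gi seeds x → P x := by
  intro x hx
  induction hx with
  | seed h => exact hseed _ h
  | step _ he ih => exact hstep _ _ ih he

-- a valid gate's edges go to valid, strictly smaller gates
theorem pv_edge_wf (gi : List pvGInfo) (hwf : pvWF gi) (x s : Int)
    (hx : pvValid gi x) (he : pvEdge gi x s) : 0 ≤ s ∧ s < x := by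
  have hG : PySem.List.pyGetD gi x pvDefG = gi[x.toNat]'(by obtain ⟨h0, h1⟩ := hx; omega) :=
    PySem.List.pyGetD_eq_getElem gi _ hx.1 hx.2
  have hGOK := hwf x.toNat (by obtain ⟨h0, h1⟩ := hx; omega)
  unfold pvEdge at he
  rw [hG] at he
  have hxc : (x.toNat : Int) = x := Int.toNat_of_nonneg hx.1
  have hx0 := hx.1
  have hx1 := hx.2
  rcases he with ⟨_, h⟩ | ⟨_, h⟩
  · have := hGOK.1 s h; omega
  · have := hGOK.2 s h; omega

theorem pv_edge_valid (gi : List pvGInfo) (hwf : pvWF gi) (x s : Int)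
    (hx : pvValid gi x) (he : pvEdge gi x s) : pvValid gi s := by
  have h := pv_edge_wf gi hwf x s hx he
  exact ⟨h.1, by obtain ⟨h0, h1⟩ := hx; omega⟩

-- everything A's worklist loop ever holds satisfies any edge-closed property of the seeds
theorem pvLoopA_sound (gi : List pvGInfo) (P : Int → Prop)
    (hstep : ∀ x s, P x → pvEdge gi x s → P s) :
    ∀ (f : Nat) (crit : PySem.Set Int) (wl : List Int),
      (∀ x ∈ crit, P x) → (∀ x ∈ wl, P x) →
      ∀ y ∈ pvLoopA gi f crit wl, P y := by
  intro f
  induction f with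
  | zero => intro crit wl hc _ y hy; exact hc y hy
  | succ f ih =>
    intro crit wl hc hw y hy
    rcases List.eq_nil_or_concat' wl with rfl | ⟨wl', x, rfl⟩
    · simp only [pvLoopA] at hy; exact hc y hy
    · have hx : P x := hw x (by simp)
      have hw' : ∀ z ∈ wl', P z := fun z hz => hw z (by simp [hz])
      simp only [pvLoopA, PySem.List.pop?_last] at hy
      by_cases hm : PySem.Set.contains crit x
      · rw [if_pos hm] at hy; exact ih crit wl' hc hw' y hy
      · rw [if_neg hm] at hy
        refine ih _ _ ?_ ?_ y hy
        · intro z hz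
          rcases (PySem.Set.mem_add (s := crit) (x := x) (y := z)).mp hz with h | h
          · exact hc z h
          · exact h ▸ hx
        · intro z hz
          rcases hg : PySem.List.pyGetD gi x
              ((none : Option Int), (0 : Int), (none : Option Int), (0 : Int), (0 : Int)) with
            ⟨ia, iat, ib, ibt, st⟩
          rw [hg] at hz
          -- z came from wl', from the a-push or from the b-push
          have hia : (iat = st ∧ ia ≠ none) → z = ia.getD 0 → (iat = st ∧ ia = some z) := by
            rintro hc rfl
            rcases ia with _ | sa
            · exact absurd rfl hc.2
            · exact ⟨hc.1, rfl⟩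
          have hib : (ibt = st ∧ ib ≠ none) → z = ib.getD 0 → (ibt = st ∧ ib = some z) := by
            rintro hc rfl
            rcases ib with _ | sb
            · exact absurd rfl hc.2
            · exact ⟨hc.1, rfl⟩
          have hzsplit : z ∈ wl' ∨ (iat = st ∧ ia = some z) ∨ (ibt = st ∧ ib = some z) := by
            dsimp only at hz
            split_ifs at hz with h1 h2 h2
            · rcases List.mem_append.mp hz with hz' | hz'
              · rcases List.mem_append.mp hz' with h | h
                · exact Or.inl h
                · exact Or.inr (Or.inl (hia h2 (List.mem_singleton.mp h)))
              · exact Or.inr (Or.inr (hib h1 (List.mem_singleton.mp hz')))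
            · rcases List.mem_append.mp hz with hz' | hz'
              · exact Or.inl hz'
              · exact Or.inr (Or.inr (hib h1 (List.mem_singleton.mp hz')))
            · rcases List.mem_append.mp hz with hz' | hz'
              · exact Or.inl hz'
              · exact Or.inr (Or.inl (hia h2 (List.mem_singleton.mp hz')))
            · exact Or.inl hz
          rcases hzsplit with h | h | h
          · exact hw' z h
          · exact hstep x z hx (by unfold pvEdge pvDefG; rw [hg]; exact Or.inl ⟨h.1, h.2⟩)
          · exact hstep x z hx (by unfold pvEdge pvDefG; rw [hg]; exact Or.inr ⟨h.1, h.2⟩)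

-- A's worklist loop terminates within its fuel and returns a closed superset of crit and wl
theorem pvLoopA_run (gi : List pvGInfo) (hwf : pvWF gi) :
    ∀ (f : Nat) (crit : PySem.Set Int) (wl : List Int),
      crit.Nodup →
      (∀ x ∈ crit, pvValid gi x) → (∀ x ∈ wl, pvValid gi x) →
      (∀ x ∈ crit, ∀ s, pvEdge gi x s → s ∈ crit ∨ s ∈ wl) →
      3 * pvMiss gi crit + wl.length < f →
      (∀ x ∈ crit, x ∈ pvLoopA gi f crit wl) ∧
      (∀ x ∈ wl, x ∈ pvLoopA gi f crit wl) ∧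
      (∀ x ∈ pvLoopA gi f crit wl, ∀ s, pvEdge gi x s → s ∈ pvLoopA gi f crit wl) ∧
      (pvLoopA gi f crit wl).Nodup ∧
      (∀ x ∈ pvLoopA gi f crit wl, pvValid gi x) := by
  intro f
  induction f with
  | zero => intro crit wl _ _ _ _ hF; omega
  | succ f ih =>
    intro crit wl hnd hvc hvw hcl hF
    rcases List.eq_nil_or_concat' wl with rfl | ⟨wl', x, rfl⟩
    · have hC : pvLoopA gi (f + 1) crit [] = crit := by simp only [pvLoopA]; rfl
      rw [hC]
      refine ⟨fun x hx => hx, by simp, ?_, hnd, hvc⟩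
      intro y hy s hs
      rcases hcl y hy s hs with h | h
      · exact h
      · simp at h
    · have hlen : wl'.length + 1 = (wl' ++ [x]).length := by simp
      have hxv : pvValid gi x := hvw x (by simp)
      have hvw' : ∀ z ∈ wl', pvValid gi z := fun z hz => hvw z (by simp [hz])
      by_cases hm : x ∈ crit
      · have hC : pvLoopA gi (f + 1) crit (wl' ++ [x]) = pvLoopA gi f crit wl' := by
          simp only [pvLoopA, PySem.List.pop?_last]
          rw [if_pos (by simpa using hm)]
        rw [hC]
        have hcl' : ∀ y ∈ crit, ∀ s, pvEdge gi y s → s ∈ crit ∨ s ∈ wl' := by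
          intro y hy s hs
          rcases hcl y hy s hs with h | h
          · exact Or.inl h
          · rcases List.mem_append.mp h with h' | h'
            · exact Or.inr h'
            · exact Or.inl (List.mem_singleton.mp h' ▸ hm)
        obtain ⟨c1, c2, c3, c4, c5⟩ := ih crit wl' hnd hvc hvw' hcl' (by omega)
        exact ⟨c1, fun z hz => (by
          rcases List.mem_append.mp hz with h' | h'
          · exact c2 z h'
          · exact List.mem_singleton.mp h' ▸ c1 x hm), c3, c4, c5⟩
      · rcases hg : PySem.List.pyGetD gi x
            ((none : Option Int), (0 : Int), (none : Option Int), (0 : Int), (0 : Int)) with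
          ⟨ia, iat, ib, ibt, st⟩
        have hedge_of_push :
            ∀ z, ((iat = st ∧ ia ≠ none) ∧ z = ia.getD 0) ∨ ((ibt = st ∧ ib ≠ none) ∧ z = ib.getD 0) →
              pvEdge gi x z := by
          rintro z (⟨hc', rfl⟩ | ⟨hc', rfl⟩)
          · rcases hia : ia with _ | sa
            · exact absurd hia hc'.2
            · unfold pvEdge pvDefG
              rw [hg]
              exact Or.inl ⟨hc'.1, by simp [hia]⟩
          · rcases hib : ib with _ | sb
            · exact absurd hib hc'.2
            · unfold pvEdge pvDefG
              rw [hg]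
              exact Or.inr ⟨hc'.1, by simp [hib]⟩
        have hC : pvLoopA gi (f + 1) crit (wl' ++ [x]) =
            pvLoopA gi f (PySem.Set.add crit x)
              (if ibt = st ∧ ib ≠ none then
                  (if iat = st ∧ ia ≠ none then wl' ++ [ia.getD 0] else wl') ++ [ib.getD 0]
                else (if iat = st ∧ ia ≠ none then wl' ++ [ia.getD 0] else wl')) := by
          simp only [pvLoopA, PySem.List.pop?_last]
          rw [if_neg (by simpa using hm), hg]
        rw [hC]
        have hadd : PySem.Set.add crit x = crit ++ [x] := PySem.Set.add_of_not_mem hm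
        have hmemadd : ∀ z, z ∈ PySem.Set.add crit x ↔ z ∈ crit ∨ z = x := by
          intro z
          rw [hadd]
          simp
        set wl2 := (if ibt = st ∧ ib ≠ none then
            (if iat = st ∧ ia ≠ none then wl' ++ [ia.getD 0] else wl') ++ [ib.getD 0]
          else (if iat = st ∧ ia ≠ none then wl' ++ [ia.getD 0] else wl')) with hwl2
        have hwl2mem : ∀ z ∈ wl2, z ∈ wl' ∨ pvEdge gi x z := by
          intro z hz
          rw [hwl2] at hz
          split_ifs at hz with h1 h2 h2
          · rcases List.mem_append.mp hz with hz' | hz'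
            · rcases List.mem_append.mp hz' with h' | h'
              · exact Or.inl h'
              · exact Or.inr (hedge_of_push z (Or.inl ⟨h2, List.mem_singleton.mp h'⟩))
            · exact Or.inr (hedge_of_push z (Or.inr ⟨h1, List.mem_singleton.mp hz'⟩))
          · rcases List.mem_append.mp hz with hz' | hz'
            · exact Or.inl hz'
            · exact Or.inr (hedge_of_push z (Or.inr ⟨h1, List.mem_singleton.mp hz'⟩))
          · rcases List.mem_append.mp hz with hz' | hz'
            · exact Or.inl hz'
            · exact Or.inr (hedge_of_push z (Or.inl ⟨h2, List.mem_singleton.mp hz'⟩))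
          · exact Or.inl hz
        have hwl2sub : ∀ z ∈ wl', z ∈ wl2 := by
          intro z hz
          rw [hwl2]
          split_ifs <;> simp [hz]
        have hwl2push : ∀ s, pvEdge gi x s → s ∈ wl2 := by
          intro s hs
          have hG : PySem.List.pyGetD gi x pvDefG = gi[x.toNat]'(by obtain ⟨h0, h1⟩ := hxv; omega) :=
            PySem.List.pyGetD_eq_getElem gi _ hxv.1 hxv.2
          unfold pvEdge at hs
          rw [show PySem.List.pyGetD gi x pvDefG = (ia, iat, ib, ibt, st) from hg] at hs
          rw [hwl2]
          rcases hs with ⟨h1, h2⟩ | ⟨h1, h2⟩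
          · dsimp only at h1 h2
            have hcnd : iat = st ∧ ia ≠ none := ⟨h1, by rw [h2]; simp⟩
            have : s = ia.getD 0 := by rw [h2]; rfl
            subst this
            by_cases hB' : ibt = st ∧ ib ≠ none
            · rw [if_pos hB', if_pos hcnd]; simp
            · rw [if_neg hB', if_pos hcnd]; simp
          · dsimp only at h1 h2
            have hcnd : ibt = st ∧ ib ≠ none := ⟨h1, by rw [h2]; simp⟩
            have : s = ib.getD 0 := by rw [h2]; rfl
            subst this
            rw [if_pos hcnd]
            simp
        have hwl2len : wl2.length ≤ wl'.length + 2 := by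
          rw [hwl2]
          split_ifs <;> simp
        have hnd' : (PySem.Set.add crit x).Nodup := PySem.Set.nodup_add crit x hnd
        have hvc' : ∀ z ∈ PySem.Set.add crit x, pvValid gi z := by
          intro z hz
          rcases (hmemadd z).mp hz with h | h
          · exact hvc z h
          · exact h ▸ hxv
        have hvw2 : ∀ z ∈ wl2, pvValid gi z := by
          intro z hz
          rcases hwl2mem z hz with h | h
          · exact hvw' z h
          · exact pv_edge_valid gi hwf x z hxv h
        have hcl' : ∀ y ∈ PySem.Set.add crit x, ∀ s, pvEdge gi y s →
            s ∈ PySem.Set.add crit x ∨ s ∈ wl2 := by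
          intro y hy s hs
          rcases (hmemadd y).mp hy with h | h
          · rcases hcl y h s hs with h' | h'
            · exact Or.inl ((hmemadd s).mpr (Or.inl h'))
            · rcases List.mem_append.mp h' with h'' | h''
              · exact Or.inr (hwl2sub s h'')
              · exact Or.inl ((hmemadd s).mpr (Or.inr (List.mem_singleton.mp h'')))
          · subst h
            exact Or.inr (hwl2push s hs)
        have hmiss : pvMiss gi (crit ++ [x]) + 1 = pvMiss gi crit :=
          pv_miss_add gi crit x hm hxv.1 hxv.2
        obtain ⟨c1, c2, c3, c4, c5⟩ := ih (PySem.Set.add crit x) wl2 hnd' hvc' hvw2 hcl'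
          (by rw [hadd] at *; simp only [List.length_append, List.length_singleton] at hF; omega)
        refine ⟨?_, ?_, c3, c4, c5⟩
        · intro z hz
          exact c1 z ((hmemadd z).mpr (Or.inl hz))
        · intro z hz
          rcases List.mem_append.mp hz with h' | h'
          · exact c2 z (hwl2sub z h')
          · exact c1 z ((hmemadd z).mpr (Or.inr (List.mem_singleton.mp h')))

-- ===== B-side bridging: the pair-list forward pass computes A's (reg_time, reg_src, gate_info) =====

theorem pb_pyIdx_lt (n : Nat) (i : Int) (k : Nat) (h : PySem.List.pyIdx? n i = some k) : k < n := by
  unfold PySem.List.pyIdx? at h; split_ifs at h <;> (injection h with h; omega)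

theorem pb_zip_set : ∀ (rt : List Int) (rs : List (Option Int)) (k : Nat) (v : Int) (w : Option Int),
    rt.length = rs.length → (rt.zip rs).set k (v, w) = (rt.set k v).zip (rs.set k w) := by
  intro rt
  induction rt with
  | nil => intro rs k v w h; simp
  | cons a t ih =>
    intro rs k v w h
    rcases rs with _ | ⟨b, rs⟩
    · simp at h
    · rcases k with _ | k
      · simp [List.zip_cons_cons]
      · simp only [List.zip_cons_cons, List.set_cons_succ]
        rw [ih rs k v w (by simpa using h)]

theorem pb_zip_pyGetD (rt : List Int) (rs : List (Option Int)) (r : Int)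
    (h : rt.length = rs.length) :
    PySem.List.pyGetD (rt.zip rs) r ((0 : Int), (none : Option Int)) =
      (PySem.List.pyGetD rt r 0, PySem.List.pyGetD rs r none) := by
  have hlz : (rt.zip rs).length = rt.length := by rw [List.length_zip, h, Nat.min_self]
  unfold PySem.List.pyGetD PySem.List.pyGet?
  rw [hlz, ← h]
  rcases hk : PySem.List.pyIdx? rt.length r with _ | k
  · simp
  · have hklt : k < rt.length := pb_pyIdx_lt _ _ _ hk
    simp only [Option.bind_some]
    rw [List.getElem?_eq_getElem (l := rt.zip rs) (by rw [hlz]; omega),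
      List.getElem?_eq_getElem (l := rt) (by omega),
      List.getElem?_eq_getElem (l := rs) (by omega)]
    simp [List.getElem_zip]

theorem pb_zip_pySetD (rt : List Int) (rs : List (Option Int)) (r : Int) (v : Int) (w : Option Int)
    (h : rt.length = rs.length) :
    PySem.List.pySetD (rt.zip rs) r (v, w) =
      (PySem.List.pySetD rt r v).zip (PySem.List.pySetD rs r w) := by
  have hlz : (rt.zip rs).length = rt.length := by rw [List.length_zip, h, Nat.min_self]
  unfold PySem.List.pySetD PySem.List.pySet?
  rw [hlz, ← h]
  rcases hk : PySem.List.pyIdx? rt.length r with _ | k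
  · simp
  · simp only [Option.map_some, Option.getD_some]
    exact pb_zip_set rt rs k v w h

theorem pb_loop_eq (l : List (Int × Int × String)) :
    ∀ (i : Int) (rt : List Int) (rs : List (Option Int)) (gi : List pvGInfo),
      rt.length = rs.length →
      pbLoop l i (rt.zip rs) gi =
        (((PySem.List.enumerate l i).foldl pvStep (rt, rs, gi)).1.zip
            ((PySem.List.enumerate l i).foldl pvStep (rt, rs, gi)).2.1,
          ((PySem.List.enumerate l i).foldl pvStep (rt, rs, gi)).2.2) := by
  induction l with
  | nil => intro i rt rs gi h; simp [pbLoop, PySem.List.enumerate_nil]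
  | cons x rest ih =>
    intro i rt rs gi h
    rcases x with ⟨ra, rb, op⟩
    rw [PySem.List.enumerate_cons, List.foldl_cons]
    show pbLoop ((ra, rb, op) :: rest) i (rt.zip rs) gi = _
    rw [pbLoop]
    simp only [pb_zip_pyGetD rt rs ra h, pb_zip_pyGetD rt rs rb h]
    have hmax : (if PySem.List.pyGetD rt ra 0 < PySem.List.pyGetD rt rb 0
        then PySem.List.pyGetD rt rb 0 else PySem.List.pyGetD rt ra 0) =
        max (PySem.List.pyGetD rt ra 0) (PySem.List.pyGetD rt rb 0) := by
      split_ifs with hh <;> omega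
    simp only [hmax]
    rw [pb_zip_pySetD rt rs ra _ _ h,
      pb_zip_pySetD _ _ rb _ _ (by rw [PySem.List.length_pySetD, PySem.List.length_pySetD, h])]
    exact ih (i + 1) _ _ _
      (by rw [PySem.List.length_pySetD, PySem.List.length_pySetD,
              PySem.List.length_pySetD, PySem.List.length_pySetD, h])

theorem pb_flag0_spec (tl : List (Int × Option Int)) (mt : Int) (n : Nat)
    (hmem : ∀ p ∈ tl, ∀ v, p.2 = some v → 0 ≤ v ∧ v < (n : Int)) :
    ∀ (fl : List Bool) (acc : List Int), fl.length = n →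
      (∀ j, j < n → (fl.getD j false = true ↔ (j : Int) ∈ acc)) →
      (tl.foldl (pbSeedStep mt) fl).length = n ∧
      ∀ j, j < n → ((tl.foldl (pbSeedStep mt) fl).getD j false = true ↔
        (j : Int) ∈ tl.foldl
          (fun acc p => if p.1 = mt ∧ p.2 ≠ none then acc ++ [p.2.getD 0] else acc) acc) := by
  induction tl with
  | nil => intro fl acc hlen hinv; exact ⟨hlen, fun j hj => hinv j hj⟩
  | cons p tl ih =>
    intro fl acc hlen hinv
    have hmem' : ∀ q ∈ tl, ∀ v, q.2 = some v → 0 ≤ v ∧ v < (n : Int) :=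
      fun q hq => hmem q (List.mem_cons_of_mem _ hq)
    rw [List.foldl_cons, List.foldl_cons]
    by_cases hc : p.1 = mt ∧ p.2 ≠ none
    · rcases hv : p.2 with _ | v
      · exact absurd hv hc.2
      · have hb := hmem p (List.mem_cons_self) v hv
        have hstep : pbSeedStep mt fl p = fl.set v.toNat true := by
          rw [pbSeedStep, if_pos hc, hv]
          simpa using PySem.List.pySetD_of_nonneg (xs := fl) (i := v) (v := true) hb.1
        rw [hstep, if_pos (show p.1 = mt ∧ (some v : Option Int) ≠ none from ⟨hc.1, by simp⟩)]
        simp only [Option.getD_some]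
        refine ih hmem' _ (acc ++ [v]) (by rw [List.length_set, hlen]) ?_
        intro j hj
        rcases eq_or_ne j v.toNat with rfl | hne
        · have : (fl.set v.toNat true).getD v.toNat false = true := by
            rw [List.getD_eq_getElem?_getD, List.getElem?_set_self (by omega)]
            simp
          rw [this]
          simp [show ((v.toNat : Int)) = v by omega]
        · have : (fl.set v.toNat true).getD j false = fl.getD j false := by
            rw [List.getD_eq_getElem?_getD, List.getElem?_set_ne (by omega),
              ← List.getD_eq_getElem?_getD]
          rw [this, hinv j hj]
          simp only [List.mem_append, List.mem_singleton]
          constructor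
          · exact Or.inl
          · rintro (h | h)
            · exact h
            · exact absurd h (by omega)
    · rw [pbSeedStep, if_neg hc, if_neg hc]
      exact ih hmem' fl acc hlen hinv








-- ===== B-side bridging: seeds flags and the descending sweep =====

-- the flag list built from the seeds comprehension flags exactly the seed gates


theorem pb_getD_set (bs : List Bool) (k j : Nat) (hk : k < bs.length) :
    (bs.set k true).getD j false = if j = k then true else bs.getD j false := by
  rcases eq_or_ne j k with rfl | hne
  · rw [if_pos rfl, List.getD_eq_getElem?_getD, List.getElem?_set_self hk]
    simp
  · rw [if_neg hne, List.getD_eq_getElem?_getD, List.getElem?_set_ne (by omega),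
      ← List.getD_eq_getElem?_getD]

-- what one step of the descending sweep does to the flag list
theorem pb_step_facts (gi : List pvGInfo) (hwf : pvWF gi) (a : Int) (hva : pvValid gi a)
    (fl : List Bool) (hlen : fl.length = gi.length) :
    (pbSweepStep gi fl a).length = fl.length ∧
    (∀ j : Nat, fl.getD j false = true → (pbSweepStep gi fl a).getD j false = true) ∧
    (∀ j : Nat, a ≤ (j : Int) → (pbSweepStep gi fl a).getD j false = fl.getD j false) ∧
    (fl.getD a.toNat false = true →
      ∀ s, pvEdge gi a s → (pbSweepStep gi fl a).getD s.toNat false = true) ∧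
    (∀ j : Nat, (pbSweepStep gi fl a).getD j false = true →
      fl.getD j false = true ∨ (fl.getD a.toNat false = true ∧ ∃ s, pvEdge gi a s ∧ j = s.toNat)) := by
  have ha0 := hva.1
  have halt := hva.2
  have hat : a.toNat < fl.length := by omega
  have hflag : PySem.List.pyGetD fl a false = fl.getD a.toNat false := by
    rw [PySem.List.pyGetD_eq_getElem fl false ha0 (by omega), List.getD_eq_getElem?_getD,
      List.getElem?_eq_getElem hat]
    rfl
  rcases hg : PySem.List.pyGetD gi a
      ((none : Option Int), (0 : Int), (none : Option Int), (0 : Int), (0 : Int)) with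
    ⟨ia, iat, ib, ibt, st⟩
  have hedge : ∀ s, pvEdge gi a s ↔ ((iat = st ∧ ia = some s) ∨ (ibt = st ∧ ib = some s)) := by
    intro s
    simp only [pvEdge, pvDefG, hg]
  have hstep : pbSweepStep gi fl a =
      (if fl.getD a.toNat false then
        (if ibt = st ∧ ib ≠ none then
          PySem.List.pySetD
            (if iat = st ∧ ia ≠ none then PySem.List.pySetD fl (ia.getD 0) true else fl)
            (ib.getD 0) true
         else (if iat = st ∧ ia ≠ none then PySem.List.pySetD fl (ia.getD 0) true else fl))
       else fl) := by
    rw [pbSweepStep, hflag, hg]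
  by_cases hON : fl.getD a.toNat false = true
  swap
  · rw [hstep, if_neg hON]
    refine ⟨rfl, fun j h => h, fun j _ => rfl, fun h => absurd h hON, fun j h => Or.inl h⟩
  rw [hstep, if_pos hON]
  -- characterize the written flag list in each of the four cases
  by_cases hA : iat = st ∧ ia ≠ none
  all_goals by_cases hB : ibt = st ∧ ib ≠ none
  -- case A true, B true
  · rcases hia : ia with _ | sa
    · exact absurd hia hA.2
    rcases hib : ib with _ | sb
    · exact absurd hib hB.2
    have hea : pvEdge gi a sa := (hedge sa).mpr (Or.inl ⟨hA.1, hia⟩)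
    have heb : pvEdge gi a sb := (hedge sb).mpr (Or.inr ⟨hB.1, hib⟩)
    have hba := pv_edge_wf gi hwf a sa hva hea
    have hbb := pv_edge_wf gi hwf a sb hva heb
    rw [if_pos (show ibt = st ∧ (some sb : Option Int) ≠ none from ⟨hB.1, by simp⟩),
      if_pos (show iat = st ∧ (some sa : Option Int) ≠ none from ⟨hA.1, by simp⟩)]
    simp only [Option.getD_some]
    rw [PySem.List.pySetD_of_nonneg (xs := fl) (i := sa) (v := true) hba.1,
      PySem.List.pySetD_of_nonneg (xs := fl.set sa.toNat true) (i := sb) (v := true) hbb.1]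
    have hchar : ∀ j : Nat, ((fl.set sa.toNat true).set sb.toNat true).getD j false =
        if j = sb.toNat then true else if j = sa.toNat then true else fl.getD j false := by
      intro j
      rw [pb_getD_set _ _ _ (by rw [List.length_set]; omega), pb_getD_set _ _ _ (by omega)]
    refine ⟨by simp, ?_, ?_, ?_, ?_⟩
    · intro j h
      rw [hchar]
      split_ifs <;> simp_all
    · intro j hja
      rw [hchar, if_neg (by omega), if_neg (by omega)]
    · intro _ s hs
      rcases (hedge s).mp hs with ⟨_, h⟩ | ⟨_, h⟩
      · rw [hia] at h
        injection h with h
        subst h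
        rw [hchar]
        split_ifs with h1 h2
        · rfl
        · rfl
        · exact absurd rfl h2
      · rw [hib] at h
        injection h with h
        subst h
        rw [hchar, if_pos rfl]
    · intro j h
      rw [hchar] at h
      split_ifs at h with h1 h2
      · exact Or.inr ⟨hON, sb, heb, h1⟩
      · exact Or.inr ⟨hON, sa, hea, h2⟩
      · exact Or.inl h
  -- case A true, B false
  · rcases hia : ia with _ | sa
    · exact absurd hia hA.2
    have hea : pvEdge gi a sa := (hedge sa).mpr (Or.inl ⟨hA.1, hia⟩)
    have hba := pv_edge_wf gi hwf a sa hva hea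
    rw [if_neg hB, if_pos (show iat = st ∧ (some sa : Option Int) ≠ none from ⟨hA.1, by simp⟩)]
    simp only [Option.getD_some]
    rw [PySem.List.pySetD_of_nonneg (xs := fl) (i := sa) (v := true) hba.1]
    have hchar : ∀ j : Nat, (fl.set sa.toNat true).getD j false =
        if j = sa.toNat then true else fl.getD j false := by
      intro j
      rw [pb_getD_set _ _ _ (by omega)]
    refine ⟨by simp, ?_, ?_, ?_, ?_⟩
    · intro j h
      rw [hchar]
      split_ifs <;> simp_all
    · intro j hja
      rw [hchar, if_neg (by omega)]
    · intro _ s hs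
      rcases (hedge s).mp hs with ⟨_, h⟩ | ⟨hb1, h⟩
      · rw [hia] at h
        injection h with h
        subst h
        rw [hchar, if_pos rfl]
      · exact absurd ⟨hb1, by rw [h]; simp⟩ hB
    · intro j h
      rw [hchar] at h
      split_ifs at h with h1
      · exact Or.inr ⟨hON, sa, hea, h1⟩
      · exact Or.inl h
  -- case A false, B true
  · rcases hib : ib with _ | sb
    · exact absurd hib hB.2
    have heb : pvEdge gi a sb := (hedge sb).mpr (Or.inr ⟨hB.1, hib⟩)
    have hbb := pv_edge_wf gi hwf a sb hva heb
    rw [if_pos (show ibt = st ∧ (some sb : Option Int) ≠ none from ⟨hB.1, by simp⟩), if_neg hA]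
    simp only [Option.getD_some]
    rw [PySem.List.pySetD_of_nonneg (xs := fl) (i := sb) (v := true) hbb.1]
    have hchar : ∀ j : Nat, (fl.set sb.toNat true).getD j false =
        if j = sb.toNat then true else fl.getD j false := by
      intro j
      rw [pb_getD_set _ _ _ (by omega)]
    refine ⟨by simp, ?_, ?_, ?_, ?_⟩
    · intro j h
      rw [hchar]
      split_ifs <;> simp_all
    · intro j hja
      rw [hchar, if_neg (by omega)]
    · intro _ s hs
      rcases (hedge s).mp hs with ⟨ha1, h⟩ | ⟨_, h⟩
      · exact absurd ⟨ha1, by rw [h]; simp⟩ hA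
      · rw [hib] at h
        injection h with h
        subst h
        rw [hchar, if_pos rfl]
    · intro j h
      rw [hchar] at h
      split_ifs at h with h1
      · exact Or.inr ⟨hON, sb, heb, h1⟩
      · exact Or.inl h
  -- case A false, B false
  · rw [if_neg hB, if_neg hA]
    refine ⟨rfl, fun j h => h, fun j _ => rfl, ?_, fun j h => Or.inl h⟩
    intro _ s hs
    rcases (hedge s).mp hs with ⟨ha1, h⟩ | ⟨hb1, h⟩
    · exact absurd ⟨ha1, by rw [h]; simp⟩ hA
    · exact absurd ⟨hb1, by rw [h]; simp⟩ hB

-- one descending sweep closes the flag set under critical edges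
theorem pb_sweep_spec (gi : List pvGInfo) (seeds : List Int) (hwf : pvWF gi) :
    ∀ (k : Nat) (a : Int) (fl : List Bool), a + 1 ≤ (k : Int) → a < (gi.length : Int) →
      fl.length = gi.length →
      (∀ j, j < gi.length → fl.getD j false = true → pvReach gi seeds (j : Int)) →
      (∀ j, j < gi.length → a < (j : Int) → fl.getD j false = true →
        ∀ s, pvEdge gi (j : Int) s → s.toNat < gi.length ∧ fl.getD s.toNat false = true) →
      ((PySem.List.pyRange a (-1) (-1)).foldl (pbSweepStep gi) fl).length = gi.length ∧
      (∀ j, j < gi.length → fl.getD j false = true →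
        ((PySem.List.pyRange a (-1) (-1)).foldl (pbSweepStep gi) fl).getD j false = true) ∧
      (∀ j, j < gi.length →
        ((PySem.List.pyRange a (-1) (-1)).foldl (pbSweepStep gi) fl).getD j false = true →
          pvReach gi seeds (j : Int)) ∧
      (∀ j, j < gi.length →
        ((PySem.List.pyRange a (-1) (-1)).foldl (pbSweepStep gi) fl).getD j false = true →
        ∀ s, pvEdge gi (j : Int) s → s.toNat < gi.length ∧
          ((PySem.List.pyRange a (-1) (-1)).foldl (pbSweepStep gi) fl).getD s.toNat false = true) := by
  intro k
  induction k with
  | zero =>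
    intro a fl hk ha hlen hsound hclosed
    rw [PySem.List.pyRange_neg_one_eq_nil (by omega : a ≤ (-1 : Int))]
    simp only [List.foldl_nil]
    exact ⟨hlen, fun j hj h => h, hsound,
      fun j hj hf s hs => hclosed j hj (by omega) hf s hs⟩
  | succ k ih =>
    intro a fl hk ha hlen hsound hclosed
    by_cases hneg : a ≤ -1
    · rw [PySem.List.pyRange_neg_one_eq_nil hneg]
      simp only [List.foldl_nil]
      exact ⟨hlen, fun j hj h => h, hsound,
        fun j hj hf s hs => hclosed j hj (by omega) hf s hs⟩
    · have ha0 : (0 : Int) ≤ a := by omega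
      rw [PySem.List.pyRange_neg_one_cons (by omega : (-1 : Int) < a), List.foldl_cons]
      have hva : pvValid gi a := ⟨ha0, ha⟩
      obtain ⟨w1, w2, w3, w4, w5⟩ := pb_step_facts gi hwf a hva fl hlen
      have hlen1 : (pbSweepStep gi fl a).length = gi.length := by rw [w1, hlen]
      have hsound1 : ∀ j, j < gi.length →
          (pbSweepStep gi fl a).getD j false = true → pvReach gi seeds (j : Int) := by
        intro j hj h
        rcases w5 j h with h' | ⟨hON, t, ht, rfl⟩
        · exact hsound j hj h'
        · have hra : pvReach gi seeds a := by
            have := hsound a.toNat (by omega) hON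
            rwa [show ((a.toNat : Int)) = a by omega] at this
          have hwt := pv_edge_wf gi hwf a t hva ht
          have : pvReach gi seeds t := pvReach.step hra ht
          rwa [show ((t.toNat : Int)) = t by omega]
      have hclosed1 : ∀ j, j < gi.length → a - 1 < (j : Int) →
          (pbSweepStep gi fl a).getD j false = true →
          ∀ s, pvEdge gi (j : Int) s → s.toNat < gi.length ∧
            (pbSweepStep gi fl a).getD s.toNat false = true := by
        intro j hj hja h s hs
        have hvj : pvValid gi (j : Int) := ⟨by omega, by omega⟩
        have hws := pv_edge_wf gi hwf (j : Int) s hvj hs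
        refine ⟨by omega, ?_⟩
        rcases eq_or_lt_of_le (show a ≤ (j : Int) by omega) with heq | hlt
        · -- j is exactly the gate processed at this step
          have hfl : fl.getD j false = true := by rw [← w3 j (by omega)]; exact h
          have hON : fl.getD a.toNat false = true := by
            rwa [show a.toNat = j by omega]
          have := w4 hON s (by rwa [← heq] at hs)
          exact this
        · -- j was processed earlier: flags above a are stable and already closed
          have hfl : fl.getD j false = true := by rw [← w3 j (by omega)]; exact h
          have := hclosed j hj hlt hfl s hs
          exact w2 s.toNat this.2
      obtain ⟨c1, c2, c3, c4⟩ := ih (a - 1) (pbSweepStep gi fl a)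
        (by omega) (by omega) hlen1 hsound1 hclosed1
      exact ⟨c1, fun j hj h => c2 j hj (w2 j h), c3, c4⟩

-- the forward pass preserves the lengths of reg_time and reg_src
theorem pv_fwd_len (l : List (Int × Int × String)) :
    ∀ (i : Int) (rt : List Int) (rs : List (Option Int)) (gi : List pvGInfo),
      (((PySem.List.enumerate l i).foldl pvStep (rt, rs, gi)).1.length = rt.length) ∧
      (((PySem.List.enumerate l i).foldl pvStep (rt, rs, gi)).2.1.length = rs.length) := by
  induction l with
  | nil => intro i rt rs gi; rw [PySem.List.enumerate_nil]; exact ⟨rfl, rfl⟩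
  | cons x rest ih =>
    intro i rt rs gi
    rcases x with ⟨ra, rb, op⟩
    rw [PySem.List.enumerate_cons, List.foldl_cons]
    have key : pvStep (rt, rs, gi) (i, (ra, rb, op)) =
        (PySem.List.pySetD (PySem.List.pySetD rt ra
            (max (PySem.List.pyGetD rt ra 0) (PySem.List.pyGetD rt rb 0) + (pvLat op).1)) rb
            (max (PySem.List.pyGetD rt ra 0) (PySem.List.pyGetD rt rb 0) + (pvLat op).2),
         PySem.List.pySetD (PySem.List.pySetD rs ra (some i)) rb (some i),
         gi ++ [(PySem.List.pyGetD rs ra none, PySem.List.pyGetD rt ra 0,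
                 PySem.List.pyGetD rs rb none, PySem.List.pyGetD rt rb 0,
                 max (PySem.List.pyGetD rt ra 0) (PySem.List.pyGetD rt rb 0))]) := rfl
    rw [key]
    obtain ⟨h1, h2⟩ := ih (i + 1)
      (PySem.List.pySetD (PySem.List.pySetD rt ra
            (max (PySem.List.pyGetD rt ra 0) (PySem.List.pyGetD rt rb 0) + (pvLat op).1)) rb
            (max (PySem.List.pyGetD rt ra 0) (PySem.List.pyGetD rt rb 0) + (pvLat op).2))
      (PySem.List.pySetD (PySem.List.pySetD rs ra (some i)) rb (some i))
      (gi ++ [(PySem.List.pyGetD rs ra none, PySem.List.pyGetD rt ra 0,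
                 PySem.List.pyGetD rs rb none, PySem.List.pyGetD rt rb 0,
                 max (PySem.List.pyGetD rt ra 0) (PySem.List.pyGetD rt rb 0))])
    rw [h1, h2, PySem.List.length_pySetD, PySem.List.length_pySetD,
      PySem.List.length_pySetD, PySem.List.length_pySetD]
    exact ⟨rfl, rfl⟩

theorem pv_zip_drop (l : List Int) (l' : List (Option Int)) (n : Nat) :
    (l.zip l').drop n = (l.drop n).zip (l'.drop n) := by
  induction l generalizing l' n with
  | nil => simp
  | cons a t ih =>
    rcases l' with _ | ⟨b, t'⟩
    · simp
    · rcases n with _ | n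
      · simp
      · simpa using ih t' n

theorem pv_foldl_max_max (t : List Int) : ∀ (c x : Int),
    t.foldl max (max c x) = max c (t.foldl max x) := by
  induction t with
  | nil => intro c x; simp
  | cons y t ih =>
    intro c x
    simp only [List.foldl_cons, max_assoc]
    rw [ih]

-- under Pre_, max(gen) agrees with the 0-seeded running maximum
theorem pv_nregs_eq (fpan : List (Int × Int × String)) (hne : fpan ≠ [])
    (hM : 1 ≤ (fpan.map (fun t => max t.1 t.2.1)).foldl max 0) :
    pvNRegs fpan = (fpan.map (fun t => max t.1 t.2.1)).foldl max 0 := by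
  rcases hl : fpan.map (fun t => max t.1 t.2.1) with _ | ⟨m0, restm⟩
  · exact absurd (List.map_eq_nil_iff.mp hl) hne
  · unfold pvNRegs
    rw [hl, PySem.List.max?_id_cons]
    simp only [Option.getD_some]
    rw [hl, List.foldl_cons] at hM
    rw [List.foldl_cons]
    have hcomm := pv_foldl_max_max restm 0 m0
    rw [hcomm] at hM ⊢
    omega

-- the seeds comprehension, read through the zipped register list
theorem pv_seeds_as_foldl (rt : List Int) (rs : List (Option Int)) (nregs mt : Int)
    (hlen : rt.length = rs.length) (hn : (rt.length : Int) = nregs + 1) :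
    pvSeeds rt rs nregs mt =
      ((rt.zip rs).drop 1).foldl
        (fun acc p => if p.1 = mt ∧ p.2 ≠ none then acc ++ [p.2.getD 0] else acc) [] := by
  unfold pvSeeds
  have hzl : ((rt.zip rs).length : Int) = nregs + 1 := by
    rw [List.length_zip, hlen, Nat.min_self, ← hlen, hn]
  have hcong : ∀ (acc : List Int) (r : Int), r ∈ PySem.List.pyRange 1 (nregs + 1) 1 →
      (if PySem.List.pyGetD rt r 0 = mt ∧ PySem.List.pyGetD rs r none ≠ none then
          acc ++ [(PySem.List.pyGetD rs r none).getD 0]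
        else acc)
      = (fun (acc : List Int) (p : Int × Option Int) =>
          if p.1 = mt ∧ p.2 ≠ none then acc ++ [p.2.getD 0] else acc) acc
          (PySem.List.pyGetD (rt.zip rs) r ((0 : Int), (none : Option Int))) := by
    intro acc r _
    rw [pb_zip_pyGetD rt rs r hlen]
  have h1 : (PySem.List.pyRange 1 (nregs + 1) 1).foldl
      (fun acc r =>
        if PySem.List.pyGetD rt r 0 = mt ∧ PySem.List.pyGetD rs r none ≠ none then
          acc ++ [(PySem.List.pyGetD rs r none).getD 0]
        else acc) [] =
      (PySem.List.pyRange 1 (nregs + 1) 1).foldl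
      (fun acc r => (fun (acc : List Int) (p : Int × Option Int) =>
          if p.1 = mt ∧ p.2 ≠ none then acc ++ [p.2.getD 0] else acc) acc
        (PySem.List.pyGetD (rt.zip rs) r ((0 : Int), (none : Option Int)))) [] :=
    PySem.List.foldl_congr_mem _ _ _ _ hcong
  rw [h1, show nregs + 1 = ((rt.zip rs).length : Int) from hzl.symm]
  exact PySem.List.foldl_pyRange_pyGetD' (rt.zip rs) ((0 : Int), (none : Option Int))
    (fun (acc : List Int) (p : Int × Option Int) =>
      if p.1 = mt ∧ p.2 ≠ none then acc ++ [p.2.getD 0] else acc) [] (by norm_num : (0:Int) ≤ 1)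

-- empty crit misses every gate
theorem pv_miss_nil (gi : List pvGInfo) : pvMiss gi PySem.Set.empty = gi.length := by
  simp [pvMiss, PySem.Set.empty]

-- membership in B's result comprehension
theorem pb_filter_mem (F : List Bool) (n : Nat) (hlen : F.length = n) (idx : Int) :
    idx ∈ (PySem.List.pyRange 0 (n : Int) 1).filter
        (fun i => PySem.List.pyGetD F i false) ↔
      ∃ j : Nat, j < n ∧ (j : Int) = idx ∧ F.getD j false = true := by
  rw [List.mem_filter]
  constructor
  · rintro ⟨hr, hget⟩
    have hb := (PySem.List.mem_pyRange_one).mp hr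
    refine ⟨idx.toNat, by omega, by omega, ?_⟩
    rw [PySem.List.pyGetD_eq_getElem F false (by omega) (by omega)] at hget
    rw [List.getD_eq_getElem?_getD, List.getElem?_eq_getElem (by omega)]
    exact hget
  · rintro ⟨j, hj, rfl, hget⟩
    refine ⟨(PySem.List.mem_pyRange_one).mpr ⟨by omega, by omega⟩, ?_⟩
    rw [PySem.List.pyGetD_eq_getElem F false (by omega) (by omega)]
    rw [List.getD_eq_getElem?_getD, List.getElem?_eq_getElem (by omega)] at hget
    simpa using hget

-- ===== VERDICT (by name: the statement is the Claim_ definition above) =====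
theorem critical_gates_spec : Claim_equal_critical_gates := by
  unfold Claim_equal_critical_gates Spec_critical_gates
  intro fpan _ hpre
  by_cases h : fpan = []
  · simp [critical_gates, critical_gates_alt, h]
  · have hM : 1 ≤ (fpan.map (fun t => max t.1 t.2.1)).foldl max 0 := by
      rcases hpre with h' | h'
      · exact absurd h' h
      · exact h'.1
    have hnr1 : 1 ≤ pvNRegs fpan := by rw [pv_nregs_eq fpan h hM]; exact hM
    have hn0 : 0 < fpan.length := List.length_pos_of_ne_nil h
    simp only [critical_gates, critical_gates_alt, if_neg h]
    rw [show ((PySem.List.max? (fpan.map (fun t => max t.1 t.2.1)) (fun x => x)).getD 0)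
        = pvNRegs fpan from rfl]
    -- A-side forward invariants
    have hrs0 : pvRSOK 0 (PySem.List.pyRepeat [(none : Option Int)] (pvNRegs fpan + 1)) := by
      intro o ho t hot
      rw [PySem.List.pyRepeat_singleton] at ho
      rw [List.eq_of_mem_replicate ho] at hot
      exact absurd hot (by simp)
    have hinv := pv_fwd_inv fpan 0 (PySem.List.pyRepeat [(0 : Int)] (pvNRegs fpan + 1))
      (PySem.List.pyRepeat [(none : Option Int)] (pvNRegs fpan + 1)) []
      (le_refl 0) (by simp) hrs0 (by intro k hk; simp at hk)
    rw [show ((PySem.List.enumerate fpan 0).foldl pvStep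
        (PySem.List.pyRepeat [(0 : Int)] (pvNRegs fpan + 1),
         PySem.List.pyRepeat [(none : Option Int)] (pvNRegs fpan + 1), [])) =
          pvForward fpan (pvNRegs fpan) from rfl] at hinv
    obtain ⟨hwf, hrsok, hgilen⟩ := hinv
    have hrsok' : pvRSOK (fpan.length : Int) (pvForward fpan (pvNRegs fpan)).2.1 := by
      simpa using hrsok
    have hglN : (pvForward fpan (pvNRegs fpan)).2.2.length = fpan.length := by
      have := hgilen
      simp only [zero_add] at this
      exact_mod_cast this
    -- lengths of the register arrays
    have hflen := pv_fwd_len fpan 0 (PySem.List.pyRepeat [(0 : Int)] (pvNRegs fpan + 1))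
      (PySem.List.pyRepeat [(none : Option Int)] (pvNRegs fpan + 1)) []
    rw [show ((PySem.List.enumerate fpan 0).foldl pvStep
        (PySem.List.pyRepeat [(0 : Int)] (pvNRegs fpan + 1),
         PySem.List.pyRepeat [(none : Option Int)] (pvNRegs fpan + 1), [])) =
          pvForward fpan (pvNRegs fpan) from rfl] at hflen
    obtain ⟨hlen1, hlen2⟩ := hflen
    rw [PySem.List.pyRepeat_singleton, List.length_replicate] at hlen1 hlen2
    have hl12 : (pvForward fpan (pvNRegs fpan)).1.length =
        (pvForward fpan (pvNRegs fpan)).2.1.length := by rw [hlen1, hlen2]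
    have hlInt : ((pvForward fpan (pvNRegs fpan)).1.length : Int) = pvNRegs fpan + 1 := by
      rw [hlen1]; omega
    -- B's forward pass computes the zipped register list and the same gate_info
    have hzip0 : PySem.List.pyRepeat [((0 : Int), (none : Option Int))] (pvNRegs fpan + 1) =
        (PySem.List.pyRepeat [(0 : Int)] (pvNRegs fpan + 1)).zip
          (PySem.List.pyRepeat [(none : Option Int)] (pvNRegs fpan + 1)) := by
      rw [PySem.List.pyRepeat_singleton, PySem.List.pyRepeat_singleton,
        PySem.List.pyRepeat_singleton]
      exact (List.zip_replicate').symm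
    have hfw : pbLoop fpan 0
        (PySem.List.pyRepeat [((0 : Int), (none : Option Int))] (pvNRegs fpan + 1)) [] =
        ((pvForward fpan (pvNRegs fpan)).1.zip (pvForward fpan (pvNRegs fpan)).2.1,
          (pvForward fpan (pvNRegs fpan)).2.2) := by
      rw [hzip0]
      rw [pb_loop_eq fpan 0 _ _ []
        (by rw [PySem.List.pyRepeat_singleton, PySem.List.pyRepeat_singleton]; simp)]
      rfl
    rw [hfw]
    dsimp only
    -- tail = regs[1:]
    rw [PySem.List.slice_from_one, ← List.drop_one]
    -- max_time agrees with A's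
    have hmapfst :
        (((pvForward fpan (pvNRegs fpan)).1.zip (pvForward fpan (pvNRegs fpan)).2.1).drop 1).map
          (fun p => p.1) = (pvForward fpan (pvNRegs fpan)).1.drop 1 := by
      rw [pv_zip_drop]
      exact List.map_fst_zip (by simp [hl12])
    have hmt : (PySem.List.max?
        ((((pvForward fpan (pvNRegs fpan)).1.zip (pvForward fpan (pvNRegs fpan)).2.1).drop 1).map
          (fun p => p.1)) (fun x => x)).getD 0 = pvMaxTime (pvForward fpan (pvNRegs fpan)).1 := by
      rw [hmapfst]
      unfold pvMaxTime
      rw [PySem.List.slice_from_one, ← List.drop_one]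
    rw [hmt]
    -- flag array initialisation
    rw [show PySem.List.pyRepeat [false] ((fpan.length : Int)) =
        List.replicate fpan.length false from by rw [PySem.List.pyRepeat_singleton]; simp]
    -- the seeds flags flag exactly A's worklist seeds
    have hmemtl : ∀ p ∈ ((pvForward fpan (pvNRegs fpan)).1.zip
          (pvForward fpan (pvNRegs fpan)).2.1).drop 1,
        ∀ v, p.2 = some v → 0 ≤ v ∧ v < ((fpan.length : Nat) : Int) := by
      intro p hp v hv
      have hpz := List.mem_of_mem_drop hp
      have hm2 : p.2 ∈ (pvForward fpan (pvNRegs fpan)).2.1 := (List.of_mem_zip hpz).2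
      exact hrsok' p.2 hm2 v hv
    obtain ⟨hf0len, hf0iff⟩ := pb_flag0_spec
      (((pvForward fpan (pvNRegs fpan)).1.zip (pvForward fpan (pvNRegs fpan)).2.1).drop 1)
      (pvMaxTime (pvForward fpan (pvNRegs fpan)).1) fpan.length hmemtl
      (List.replicate fpan.length false) [] (by simp) (by simp)
    have hseeds := pv_seeds_as_foldl (pvForward fpan (pvNRegs fpan)).1
      (pvForward fpan (pvNRegs fpan)).2.1 (pvNRegs fpan)
      (pvMaxTime (pvForward fpan (pvNRegs fpan)).1) hl12 hlInt
    have hf0iff' : ∀ j, j < fpan.length →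
        (((((pvForward fpan (pvNRegs fpan)).1.zip (pvForward fpan (pvNRegs fpan)).2.1).drop 1).foldl
            (pbSeedStep (pvMaxTime (pvForward fpan (pvNRegs fpan)).1))
            (List.replicate fpan.length false)).getD j false = true ↔
          (j : Int) ∈ pvSeeds (pvForward fpan (pvNRegs fpan)).1
            (pvForward fpan (pvNRegs fpan)).2.1 (pvNRegs fpan)
            (pvMaxTime (pvForward fpan (pvNRegs fpan)).1)) := by
      intro j hj
      rw [hseeds]
      exact hf0iff j hj
    -- seed validity
    have hgiInt : ((pvForward fpan (pvNRegs fpan)).2.2.length : Int) = (fpan.length : Int) := by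
      exact_mod_cast congrArg (Nat.cast : Nat → Int) hglN
    have hseedv : ∀ x ∈ pvSeeds (pvForward fpan (pvNRegs fpan)).1
        (pvForward fpan (pvNRegs fpan)).2.1 (pvNRegs fpan)
        (pvMaxTime (pvForward fpan (pvNRegs fpan)).1),
        pvValid (pvForward fpan (pvNRegs fpan)).2.2 x := by
      intro x hx
      have hmem := pv_seeds_mem _ _ _ _ x hx
      have hb := hrsok' _ hmem x rfl
      exact ⟨hb.1, by rw [hgiInt]; exact hb.2⟩
    -- run A's worklist loop
    obtain ⟨r1, r2, r3, r4, r5⟩ := pvLoopA_run (pvForward fpan (pvNRegs fpan)).2.2 hwf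
      (3 * (pvForward fpan (pvNRegs fpan)).2.2.length +
        (pvSeeds (pvForward fpan (pvNRegs fpan)).1 (pvForward fpan (pvNRegs fpan)).2.1
          (pvNRegs fpan) (pvMaxTime (pvForward fpan (pvNRegs fpan)).1)).length + 1)
      PySem.Set.empty
      (pvSeeds (pvForward fpan (pvNRegs fpan)).1 (pvForward fpan (pvNRegs fpan)).2.1
        (pvNRegs fpan) (pvMaxTime (pvForward fpan (pvNRegs fpan)).1))
      (by simp [PySem.Set.empty]) (by intro x hx; simp [PySem.Set.empty] at hx) hseedv
      (by intro x hx; simp [PySem.Set.empty] at hx) (by rw [pv_miss_nil]; omega)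
    have hsound := pvLoopA_sound (pvForward fpan (pvNRegs fpan)).2.2
      (pvReach (pvForward fpan (pvNRegs fpan)).2.2
        (pvSeeds (pvForward fpan (pvNRegs fpan)).1 (pvForward fpan (pvNRegs fpan)).2.1
          (pvNRegs fpan) (pvMaxTime (pvForward fpan (pvNRegs fpan)).1)))
      (fun x s hx he => pvReach.step hx he)
      (3 * (pvForward fpan (pvNRegs fpan)).2.2.length +
        (pvSeeds (pvForward fpan (pvNRegs fpan)).1 (pvForward fpan (pvNRegs fpan)).2.1
          (pvNRegs fpan) (pvMaxTime (pvForward fpan (pvNRegs fpan)).1)).length + 1)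
      PySem.Set.empty
      (pvSeeds (pvForward fpan (pvNRegs fpan)).1 (pvForward fpan (pvNRegs fpan)).2.1
        (pvNRegs fpan) (pvMaxTime (pvForward fpan (pvNRegs fpan)).1))
      (by intro x hx; simp [PySem.Set.empty] at hx) (fun x hx => pvReach.seed hx)
    have hCiff : ∀ y, y ∈ pvLoopA (pvForward fpan (pvNRegs fpan)).2.2
        (3 * (pvForward fpan (pvNRegs fpan)).2.2.length +
          (pvSeeds (pvForward fpan (pvNRegs fpan)).1 (pvForward fpan (pvNRegs fpan)).2.1
            (pvNRegs fpan) (pvMaxTime (pvForward fpan (pvNRegs fpan)).1)).length + 1)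
        PySem.Set.empty
        (pvSeeds (pvForward fpan (pvNRegs fpan)).1 (pvForward fpan (pvNRegs fpan)).2.1
          (pvNRegs fpan) (pvMaxTime (pvForward fpan (pvNRegs fpan)).1)) ↔
        pvReach (pvForward fpan (pvNRegs fpan)).2.2
          (pvSeeds (pvForward fpan (pvNRegs fpan)).1 (pvForward fpan (pvNRegs fpan)).2.1
            (pvNRegs fpan) (pvMaxTime (pvForward fpan (pvNRegs fpan)).1)) y := by
      intro y
      constructor
      · intro hy
        exact hsound y hy
      · intro hr
        exact pvReach_minimal _ _ _ r2 (fun x t hx he => r3 x hx t he) y hr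
    -- run B's descending sweep
    have hf0len' : (((((pvForward fpan (pvNRegs fpan)).1.zip
        (pvForward fpan (pvNRegs fpan)).2.1).drop 1).foldl
          (pbSeedStep (pvMaxTime (pvForward fpan (pvNRegs fpan)).1))
          (List.replicate fpan.length false))).length =
        (pvForward fpan (pvNRegs fpan)).2.2.length := by
      rw [hf0len, hglN]
    obtain ⟨c1, c2, c3, c4⟩ := pb_sweep_spec (pvForward fpan (pvNRegs fpan)).2.2
      (pvSeeds (pvForward fpan (pvNRegs fpan)).1 (pvForward fpan (pvNRegs fpan)).2.1
        (pvNRegs fpan) (pvMaxTime (pvForward fpan (pvNRegs fpan)).1)) hwf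
      fpan.length ((fpan.length : Int) - 1)
      (((((pvForward fpan (pvNRegs fpan)).1.zip (pvForward fpan (pvNRegs fpan)).2.1).drop 1).foldl
          (pbSeedStep (pvMaxTime (pvForward fpan (pvNRegs fpan)).1))
          (List.replicate fpan.length false)))
      (by omega) (by rw [show ((pvForward fpan (pvNRegs fpan)).2.2.length : Int) =
          (fpan.length : Int) from hgiInt]; omega)
      hf0len'
      (by
        intro j hj hg
        exact pvReach.seed ((hf0iff' j (by omega)).mp hg))
      (by
        intro j hj hja
        exfalso
        rw [hglN] at hj
        omega)
    set GI := (pvForward fpan (pvNRegs fpan)).2.2 with hGIdef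
    set SEEDS := pvSeeds (pvForward fpan (pvNRegs fpan)).1 (pvForward fpan (pvNRegs fpan)).2.1
      (pvNRegs fpan) (pvMaxTime (pvForward fpan (pvNRegs fpan)).1) with hSEEDSdef
    set FLAG0 := (((pvForward fpan (pvNRegs fpan)).1.zip
        (pvForward fpan (pvNRegs fpan)).2.1).drop 1).foldl
      (pbSeedStep (pvMaxTime (pvForward fpan (pvNRegs fpan)).1))
      (List.replicate fpan.length false) with hFLAG0def
    set F := (PySem.List.pyRange ((fpan.length : Int) - 1) (-1) (-1)).foldl
      (pbSweepStep GI) FLAG0 with hFdef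
    set CRITA := pvLoopA GI (3 * GI.length + SEEDS.length + 1) PySem.Set.empty SEEDS
      with hCRITAdef
    -- the flag list after the sweep marks exactly the reachable gates
    have hFiff : ∀ j : Nat, j < fpan.length →
        (F.getD j false = true ↔ pvReach GI SEEDS (j : Int)) := by
      intro j hj
      constructor
      · intro hf
        exact c3 j (by rw [hglN]; exact hj) hf
      · intro hr
        have hmin := pvReach_minimal GI SEEDS
          (fun x => 0 ≤ x ∧ x < (fpan.length : Int) ∧ F.getD x.toNat false = true)
          ?_ ?_ (j : Int) hr
        · have := hmin.2.2
          rwa [show ((j : Int)).toNat = j by omega] at this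
        · intro x hx
          have hv := hseedv x hx
          have h0x := hv.1
          have hxb : x < ((fpan.length : Nat) : Int) := by rw [← hgiInt]; exact hv.2
          refine ⟨h0x, hxb, ?_⟩
          have h0 := (hf0iff' x.toNat (by omega)).mpr
            (by rw [show ((x.toNat : Int)) = x by omega]; exact hx)
          exact c2 x.toNat (by omega) h0
        · intro x t hx he
          obtain ⟨hx0, hx1, hx2⟩ := hx
          have hvx : pvValid GI x := ⟨hx0, by rw [hgiInt]; exact hx1⟩
          have hws := pv_edge_wf GI hwf x t hvx he
          obtain ⟨hws0, hws1⟩ := hws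
          have hc4 := c4 x.toNat (by omega) hx2 t
            (by rw [show ((x.toNat : Int)) = x by omega]; exact he)
          obtain ⟨hc41, hc42⟩ := hc4
          exact ⟨hws0, by omega, hc42⟩
    have hFlen : F.length = fpan.length := by rw [c1, hglN]
    -- B's result comprehension holds exactly the members of A's crit set
    have hLmem : ∀ idx : Int,
        (idx ∈ (PySem.List.pyRange 0 ((fpan.length : Nat) : Int) 1).filter
          (fun i => PySem.List.pyGetD F i false)) ↔ idx ∈ CRITA := by
      intro idx
      rw [pb_filter_mem F fpan.length hFlen idx]
      constructor
      · rintro ⟨j, hj, rfl, hget⟩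
        exact (hCiff _).mpr ((hFiff j hj).mp hget)
      · intro hidx
        have hr := (hCiff idx).mp hidx
        have hv := r5 idx hidx
        have h0i := hv.1
        have hvb : idx < ((fpan.length : Nat) : Int) := by rw [← hgiInt]; exact hv.2
        refine ⟨idx.toNat, by omega, by omega, ?_⟩
        exact (hFiff idx.toNat (by omega)).mpr
          (by rw [show ((idx.toNat : Int)) = idx by omega]; exact hr)
    have hLpair : ((PySem.List.pyRange 0 ((fpan.length : Nat) : Int) 1).filter
        (fun i => PySem.List.pyGetD F i false)).Pairwise (· < ·) :=
      List.Pairwise.filter _ (PySem.List.pairwise_lt_pyRange_one 0 ((fpan.length : Nat) : Int))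
    have hLnd : ((PySem.List.pyRange 0 ((fpan.length : Nat) : Int) 1).filter
        (fun i => PySem.List.pyGetD F i false)).Nodup :=
      hLpair.imp (fun hlt => ne_of_lt hlt)
    have hperm : ((PySem.List.pyRange 0 ((fpan.length : Nat) : Int) 1).filter
        (fun i => PySem.List.pyGetD F i false)).Perm CRITA :=
      (List.perm_ext_iff_of_nodup hLnd r4).mpr hLmem
    rw [PySem.Set.ofList_eq_self_of_nodup _ r4,
      PySem.Set.ofList_eq_self_of_nodup _ hLnd]
    exact PySem.List.sorted_eq_of_perm_of_pairwise_lt _ _ _ hperm (by simpa using hLpair)
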